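-- pv_equiv track=rewrite | github.com/Diiego300years/Python-tasks-which-I-did | from coderbyte/Pallindrome Swapper.py | PalindromeSwapper
-- ===== SOURCE A (Python) =====
-- def PalindromeSwapper(strParam):
--
--   # code goes here
--   for i in range(len(strParam)-1):
--     strList = list(strParam)
--     strList[i],strList[i+1] = strList[i+1],strList[i]
--     otherString = "".join(strList)
--     if otherString == otherString[::-1]:
--       return(otherString)
--   return "-1"
-- ===== SOURCE B (Python) =====
-- def PalindromeSwapper(strParam):
--     s = strParam
--     n = len(s)
--     # precompute the mismatched mirror-pair indices once: O(n)
--     bad = [j for j in range(n // 2) if s[j] != s[n - 1 - j]]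
--     for i in range(n - 1):
--         # the only pair indices a swap of (i, i+1) can affect
--         p1 = min(i, n - 1 - i)
--         p2 = min(i + 1, n - 2 - i)
--         pairs = [p1] if p1 == p2 else [p1, p2]
--         # every pre-existing mismatch must be one of the affected pairs
--         if not all(b in pairs for b in bad):
--             continue
--         # and each affected pair must match after the swap
--         ok = True
--         for p in pairs:
--             q = n - 1 - p
--             a = s[i + 1] if p == i else (s[i] if p == i + 1 else s[p])
--             b = s[i + 1] if q == i else (s[i] if q == i + 1 else s[q])
--             if a != b:
--                 ok = False
--         if ok:
--             lst = list(s)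
--             lst[i], lst[i + 1] = lst[i + 1], lst[i]
--             return "".join(lst)
--     return "-1"
-- ===== Notes on version B (the rewrite author's own statement) =====
-- stated objective: faster
-- what changed: Instead of rebuilding, joining and reversing the whole string for every candidate swap (O(n) work per index), B precomputes the list of mismatched mirror pairs once and for each candidate swap checks in O(1) (amortised, via short-circuit) that all mismatches lie among the at most two pairs the swap touches and that those pairs match after the swap.
import Mathlib
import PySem

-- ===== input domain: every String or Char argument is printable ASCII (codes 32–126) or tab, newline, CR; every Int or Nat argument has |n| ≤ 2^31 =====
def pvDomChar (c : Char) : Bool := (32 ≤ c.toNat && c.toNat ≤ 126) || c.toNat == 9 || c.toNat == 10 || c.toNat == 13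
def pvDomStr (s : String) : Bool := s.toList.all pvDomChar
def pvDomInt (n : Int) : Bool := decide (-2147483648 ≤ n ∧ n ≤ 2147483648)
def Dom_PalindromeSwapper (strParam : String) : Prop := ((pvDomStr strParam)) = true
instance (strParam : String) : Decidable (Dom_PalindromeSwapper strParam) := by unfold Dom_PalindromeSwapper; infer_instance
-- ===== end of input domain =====

-- B replaces A's per-index rebuild-and-reverse palindrome test by a precomputed
-- mismatched-mirror-pair list with an O(1) per-index check (objective: faster, asymptotic).

-- ===== PORT A =====
-- swap of adjacent positions i, i+1 (both reads from the original list, as Python's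
-- tuple assignment does); indices are in range at every call site, so getD defaults never fire
def pvSwapA (L : List Char) (i : Nat) : List Char :=
  (L.set i (L.getD (i+1) 'a')).set (i+1) (L.getD i 'a')

-- A's for-loop with early return: hand port, exact (range indices are nonnegative)
def pvLoopA (L : List Char) : List Nat → String
  | [] => "-1"
  | i :: rest =>
      let t := pvSwapA L i
      if t = t.reverse then String.mk t else pvLoopA L rest

def PalindromeSwapper (strParam : String) : String :=
  pvLoopA strParam.toList (List.range (strParam.toList.length - 1))

-- ===== PORT B =====
-- bad = [j for j in range(n//2) if s[j] != s[n-1-j]]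
def pvBad (L : List Char) : List Nat :=
  (List.range (L.length / 2)).filter (fun j => L.getD j 'a' ≠ L.getD (L.length - 1 - j) 'a')

-- pairs = [p1] if p1 == p2 else [p1, p2]
def pvPairs (n i : Nat) : List Nat :=
  if min i (n - 1 - i) = min (i+1) (n - 2 - i) then [min i (n - 1 - i)]
  else [min i (n - 1 - i), min (i+1) (n - 2 - i)]

-- the per-pair check after the swap, with the swapped characters substituted
def pvFixed (L : List Char) (i p : Nat) : Bool :=
  let n := L.length
  let q := n - 1 - p
  let a := if p = i then L.getD (i+1) 'a' else if p = i+1 then L.getD i 'a' else L.getD p 'a'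
  let b := if q = i then L.getD (i+1) 'a' else if q = i+1 then L.getD i 'a' else L.getD q 'a'
  a = b

def pvPredB (L : List Char) (bad : List Nat) (i : Nat) : Bool :=
  let pairs := pvPairs L.length i
  bad.all (fun j => pairs.contains j) && pairs.all (pvFixed L i)

-- lst = list(s); lst[i], lst[i+1] = lst[i+1], lst[i]; "".join(lst)
def pvSwapB (L : List Char) (i : Nat) : List Char :=
  (L.set i (L.getD (i+1) 'a')).set (i+1) (L.getD i 'a')

def pvLoopB (L : List Char) (bad : List Nat) : List Nat → String
  | [] => "-1"
  | i :: rest =>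
      if pvPredB L bad i then String.mk (pvSwapB L i) else pvLoopB L bad rest

def PalindromeSwapper_alt (strParam : String) : String :=
  pvLoopB strParam.toList (pvBad strParam.toList) (List.range (strParam.toList.length - 1))

-- ===== PRECONDITION & SPEC =====
def Spec_PalindromeSwapper (strParam : String) (out : String) : Prop := out = PalindromeSwapper_alt strParam
instance (strParam : String) (out : String) : Decidable (Spec_PalindromeSwapper strParam out) := by unfold Spec_PalindromeSwapper; infer_instance

-- ===== CLAIM (what is proved, stated in full; the proofs are below) =====
def Claim_equal_PalindromeSwapper : Prop := ∀ (strParam : String), Dom_PalindromeSwapper strParam → Spec_PalindromeSwapper strParam (PalindromeSwapper strParam)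

-- ===== LEMMAS AND PROOFS =====

theorem pvSwapA_length (L : List Char) (i : Nat) : (pvSwapA L i).length = L.length := by
  simp [pvSwapA]

theorem pvSwapA_getD (L : List Char) (i j : Nat) (hi : i + 1 < L.length) (hj : j < L.length) :
    (pvSwapA L i).getD j 'a' =
      if j = i then L.getD (i+1) 'a' else if j = i+1 then L.getD i 'a' else L.getD j 'a' := by
  have hj' : j < (pvSwapA L i).length := by rw [pvSwapA_length]; exact hj
  rw [List.getD_eq_getElem _ _ hj']
  unfold pvSwapA
  rw [List.getElem_set, List.getElem_set]
  split_ifs <;> first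
    | rfl
    | omega
    | (exact (List.getD_eq_getElem _ _ hj).symm)

theorem pal_iff (t : List Char) :
    (t = t.reverse) ↔ ∀ j, j < t.length → t.getD j 'a' = t.getD (t.length - 1 - j) 'a' := by
  constructor
  · intro h j hj
    conv_lhs => rw [h]
    simp [List.getD_eq_getElem?_getD, List.getElem?_reverse hj]
  · intro h
    apply List.ext_getElem (by simp)
    intro j h1 h2
    have hj : j < t.length := h1
    have := h j hj
    rw [List.getD_eq_getElem _ _ hj, List.getD_eq_getElem _ _ (by omega)] at this
    rw [this]
    rw [List.getElem_reverse]

theorem mem_pvBad (L : List Char) (j : Nat) :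
    j ∈ pvBad L ↔ j < L.length / 2 ∧ L.getD j 'a' ≠ L.getD (L.length - 1 - j) 'a' := by
  simp [pvBad, List.mem_filter]

theorem mem_pvPairs (n i p : Nat) :
    p ∈ pvPairs n i ↔ p = min i (n - 1 - i) ∨ p = min (i+1) (n - 2 - i) := by
  unfold pvPairs
  split_ifs with h <;> simp <;> omega

theorem pvFixed_iff (L : List Char) (i p : Nat) (hi : i + 1 < L.length) (hp : p < L.length) :
    pvFixed L i p = true ↔
      (pvSwapA L i).getD p 'a' = (pvSwapA L i).getD (L.length - 1 - p) 'a' := by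
  have hq : L.length - 1 - p < L.length := by omega
  rw [pvSwapA_getD L i p hi hp, pvSwapA_getD L i _ hi hq]
  simp [pvFixed]

theorem predB_iff (L : List Char) (i : Nat) (hi : i + 1 < L.length) :
    pvPredB L (pvBad L) i = true ↔ pvSwapA L i = (pvSwapA L i).reverse := by
  set n := L.length with hn
  have hlen : (pvSwapA L i).length = n := pvSwapA_length L i
  rw [pal_iff, hlen]
  have hsplit : pvPredB L (pvBad L) i = true ↔
      (∀ j ∈ pvBad L, j ∈ pvPairs n i) ∧ (∀ p ∈ pvPairs n i, pvFixed L i p = true) := by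
    simp [pvPredB, List.all_eq_true, ← hn]
  rw [hsplit]
  constructor
  · rintro ⟨h1, h2⟩ j hj
    by_cases hcase : j = i ∨ j = i + 1 ∨ j = n - 1 - i ∨ j = n - 2 - i
    · -- j belongs to a touched pair
      have hmemsym : ∀ m, m ∈ pvPairs n i → m < n →
          (pvSwapA L i).getD m 'a' = (pvSwapA L i).getD (n - 1 - m) 'a' := by
        intro m hm hmn
        exact (pvFixed_iff L i m hi hmn).1 (h2 m hm)
      rcases Nat.le_total j (n - 1 - j) with hle | hle
      · -- j is itself the pair index
        have hjp : j ∈ pvPairs n i := by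
          rw [mem_pvPairs]; omega
        exact hmemsym j hjp hj
      · -- n-1-j is the pair index
        have hjp : n - 1 - j ∈ pvPairs n i := by
          rw [mem_pvPairs]; omega
        have := hmemsym (n - 1 - j) hjp (by omega)
        have hjj : n - 1 - (n - 1 - j) = j := by omega
        rw [hjj] at this
        exact this.symm
    · push_neg at hcase
      obtain ⟨c1, c2, c3, c4⟩ := hcase
      have hj1 : n - 1 - j ≠ i := by omega
      have hj2 : n - 1 - j ≠ i + 1 := by omega
      rw [pvSwapA_getD L i j hi hj, pvSwapA_getD L i _ hi (by omega)]
      simp only [c1, c2, hj1, hj2, if_false]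
      by_cases heq : j = n - 1 - j
      · rw [← heq]
      by_contra hne
      -- then min j (n-1-j) is a mismatched pair index, hence must be in pairs: contradiction
      rcases Nat.le_total j (n - 1 - j) with hle | hle
      · have hm : j ∈ pvBad L := by
          rw [mem_pvBad]; exact ⟨by omega, hne⟩
        have := h1 j hm
        rw [mem_pvPairs] at this
        omega
      · have hjj : n - 1 - (n - 1 - j) = j := by omega
        have hm : n - 1 - j ∈ pvBad L := by
          rw [mem_pvBad, hjj]
          exact ⟨by omega, fun h => hne h.symm⟩
        have := h1 _ hm
        rw [mem_pvPairs] at this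
        omega
  · intro hpal
    constructor
    · intro j hj
      rw [mem_pvBad] at hj
      obtain ⟨hj2, hne⟩ := hj
      rw [mem_pvPairs]
      by_contra hnot
      push_neg at hnot
      have c1 : j ≠ i := by omega
      have c2 : j ≠ i + 1 := by omega
      have c3 : n - 1 - j ≠ i := by omega
      have c4 : n - 1 - j ≠ i + 1 := by omega
      have := hpal j (by omega)
      rw [pvSwapA_getD L i j hi (by omega), pvSwapA_getD L i _ hi (by omega)] at this
      simp only [c1, c2, c3, c4, if_false] at this
      exact hne this
    · intro p hp
      rw [mem_pvPairs] at hp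
      have hpn : p < n := by omega
      exact (pvFixed_iff L i p hi hpn).2 (hpal p hpn)

theorem loops_eq (L : List Char) (idxs : List Nat)
    (h : ∀ i ∈ idxs, i + 1 < L.length) :
    pvLoopA L idxs = pvLoopB L (pvBad L) idxs := by
  induction idxs with
  | nil => rfl
  | cons i rest ih =>
    have hi : i + 1 < L.length := h i (List.mem_cons_self ..)
    have hpred := predB_iff L i hi
    simp only [pvLoopA, pvLoopB]
    by_cases hc : pvSwapA L i = (pvSwapA L i).reverse
    · rw [if_pos hc, if_pos (hpred.2 hc)]
      rfl
    · rw [if_neg hc, if_neg (fun hb => hc (hpred.1 hb))]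
      exact ih (fun i hi => h i (List.mem_cons_of_mem _ hi))

-- ===== VERDICT (by name: the statement is the Claim_ definition above) =====
theorem PalindromeSwapper_spec : Claim_equal_PalindromeSwapper := by
  intro s _
  unfold Spec_PalindromeSwapper PalindromeSwapper PalindromeSwapper_alt
  apply loops_eq
  intro i hi
  rw [List.mem_range] at hi
  omega
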